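-- pv_equiv track=rewrite | github.com/Emir2701/mgtu | rk/copy_labs/labs/input_emir.py | cheak_int
-- ===== SOURCE A (Python) =====
-- def cheak_int(text):
-- 	flag = True
-- 	cheak_list = ['0', '1', '2', '3', '4', '5', '6', '7', '8', '9', '-', '+']
-- 	text = list(text)
-- 	for i in text:
-- 		if i not in cheak_list:
-- 			flag = False
--
-- 	if len(text) == 0:
-- 		flag = False
-- 	elif (text[0] != '-' and text.count('-') == 1) or text.count('-') > 1 or (len(text) == 1 and text[0] == '-') \
-- 	or (text[0] != '+' and text.count('+') == 1) or text.count('+') > 1 or (len(text) == 1 and text[0] == '+'):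
-- 		flag = False
--
-- 	return flag
-- ===== SOURCE B (Python) =====
-- def cheak_int(text):
-- 	text = list(text)
-- 	if not text:
-- 		return False
-- 	body = text[1:] if text[0] in ('-', '+') else text
-- 	if not body:
-- 		return False
-- 	digits = {'0', '1', '2', '3', '4', '5', '6', '7', '8', '9'}
-- 	return all(c in digits for c in body)
-- ===== Notes on version B (the rewrite author's own statement) =====
-- stated objective: simpler
-- what changed: A scans the whole string for allowed characters and then decides sign validity with two count() passes plus position arithmetic; B strips one optional leading sign and does a single short-circuiting digits-only pass over the remaining body.
import Mathlib
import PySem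

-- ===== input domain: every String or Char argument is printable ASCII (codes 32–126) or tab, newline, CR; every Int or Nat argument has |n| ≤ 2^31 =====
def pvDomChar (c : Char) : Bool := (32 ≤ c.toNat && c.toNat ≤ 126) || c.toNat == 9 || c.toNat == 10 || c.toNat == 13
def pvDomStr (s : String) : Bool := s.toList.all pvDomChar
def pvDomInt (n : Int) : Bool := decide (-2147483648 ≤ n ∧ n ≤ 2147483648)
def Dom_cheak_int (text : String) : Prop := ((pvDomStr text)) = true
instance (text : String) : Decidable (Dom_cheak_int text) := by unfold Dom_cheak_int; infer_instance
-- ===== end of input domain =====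

-- B replaces A's whole-string flag scan plus count('-')/count('+') sign arithmetic with a
-- sign-strip followed by a single digits-only pass over the remaining body (objective: simpler).

-- ===== PORT A =====
-- literal transliteration of A: the flag folded over the whole list, then the
-- emptiness / sign-position / sign-count elif chain (text[0] is safe: length 0 was checked).
def cheak_int (text : String) : Bool :=
  let cheak_list : List Char := ['0','1','2','3','4','5','6','7','8','9','-','+']
  let t := text.toList
  let flag := t.foldl (fun f i => if i ∉ cheak_list then false else f) true
  if t.length = 0 then false
  else if (t.headI ≠ '-' ∧ t.count '-' = 1) ∨ t.count '-' > 1 ∨ (t.length = 1 ∧ t.headI = '-')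
       ∨ (t.headI ≠ '+' ∧ t.count '+' = 1) ∨ t.count '+' > 1 ∨ (t.length = 1 ∧ t.headI = '+')
  then false
  else flag

-- ===== PORT B =====
-- literal transliteration of B: empty check, strip one leading sign, digit-scan the body.
def cheak_int_alt (text : String) : Bool :=
  match text.toList with
  | [] => false
  | c :: rest =>
    let body := if c = '-' ∨ c = '+' then rest else c :: rest
    if body.isEmpty then false
    else body.all (fun d => d ∈ (['0','1','2','3','4','5','6','7','8','9'] : List Char))

-- ===== PRECONDITION & SPEC =====
def Spec_cheak_int (text : String) (out : Bool) : Prop := out = cheak_int_alt text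
instance (text : String) (out : Bool) : Decidable (Spec_cheak_int text out) := by unfold Spec_cheak_int; infer_instance

-- ===== CLAIM (what is proved, stated in full; the proofs are below) =====
def Claim_equal_cheak_int : Prop := ∀ (text : String), Dom_cheak_int text → Spec_cheak_int text (cheak_int text)

-- ===== LEMMAS AND PROOFS =====
theorem flag_fold_eq (cl : List Char) (t : List Char) :
    t.foldl (fun f i => if i ∉ cl then false else f) true = t.all (fun i => i ∈ cl) := by
  have h : ∀ (t : List Char) (b : Bool),
      t.foldl (fun f i => if i ∉ cl then false else f) b = (b && t.all (fun i => i ∈ cl)) := by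
    intro t
    induction t with
    | nil => intro b; simp
    | cons x xs ih =>
      intro b
      simp only [List.foldl_cons, List.all_cons, ih]
      by_cases hx : x ∈ cl <;> simp [hx]
  simpa using h t true

theorem dig_ne (x : Char)
    (h : x = '0' ∨ x = '1' ∨ x = '2' ∨ x = '3' ∨ x = '4' ∨ x = '5' ∨ x = '6' ∨ x = '7' ∨ x = '8' ∨ x = '9') :
    ¬x = '-' ∧ ¬x = '+' := by
  rcases h with h|h|h|h|h|h|h|h|h|h <;> subst h <;> exact ⟨by decide, by decide⟩

theorem cheak_char (x : Char) :
    (x = '0' ∨ x = '1' ∨ x = '2' ∨ x = '3' ∨ x = '4' ∨ x = '5' ∨ x = '6' ∨ x = '7' ∨ x = '8' ∨ x = '9'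
      ∨ x = '-' ∨ x = '+') ∧ ¬x = '-' ∧ ¬x = '+'
    ↔ (x = '0' ∨ x = '1' ∨ x = '2' ∨ x = '3' ∨ x = '4' ∨ x = '5' ∨ x = '6' ∨ x = '7' ∨ x = '8' ∨ x = '9') := by
  constructor
  · rintro ⟨(h|h|h|h|h|h|h|h|h|h|h|h), hm, hp⟩ <;> tauto
  · intro h
    obtain ⟨hm, hp⟩ := dig_ne x h
    exact ⟨by tauto, hm, hp⟩

-- A = B, stated over the return values.
theorem main (text : String) : cheak_int text = cheak_int_alt text := by
  rcases h : text.toList with _ | ⟨c, rest⟩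
  · simp [cheak_int, cheak_int_alt, h]
  · simp only [cheak_int, cheak_int_alt, h, flag_fold_eq]
    by_cases hm : c = '-'
    · subst hm
      rcases rest with _ | ⟨d, ds⟩
      · simp
      · rw [Bool.eq_iff_iff]
        simp [List.count_cons, List.all_eq_true]
        constructor
        · rintro ⟨⟨⟨hmds, hdm⟩, hp1, hp2⟩, hd, hds⟩
          have hdp : ¬ d = '+' := by
            intro e; rw [e] at hp1 hp2; simp at hp1 hp2; omega
          rw [if_neg hdp] at hp1 hp2
          have hpds : '+' ∉ ds := List.count_eq_zero.mp (by omega)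
          exact ⟨(cheak_char d).mp ⟨hd, hdm, hdp⟩,
            fun x hx => (cheak_char x).mp ⟨hds x hx, fun e => hmds (e ▸ hx), fun e => hpds (e ▸ hx)⟩⟩
        · rintro ⟨hd, hds⟩
          obtain ⟨hdm, hdp⟩ := dig_ne d hd
          have hmds : '-' ∉ ds := fun hmem => (dig_ne _ (hds _ hmem)).1 rfl
          have hpds : '+' ∉ ds := fun hmem => (dig_ne _ (hds _ hmem)).2 rfl
          have hc0 : List.count '+' ds = 0 := List.count_eq_zero.mpr hpds
          rw [if_neg hdp, hc0]
          exact ⟨⟨⟨hmds, hdm⟩, by omega, by omega⟩,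
            ((cheak_char d).mpr hd).1, fun x hx => ((cheak_char x).mpr (hds x hx)).1⟩
    · by_cases hp : c = '+'
      · subst hp
        rcases rest with _ | ⟨d, ds⟩
        · simp
        · rw [Bool.eq_iff_iff]
          simp [List.count_cons, List.all_eq_true]
          constructor
          · rintro ⟨⟨hm1, hm2, hpds, hdp⟩, hd, hds⟩
            have hdm : ¬ d = '-' := by
              intro e; rw [e] at hm1 hm2; simp at hm1 hm2; omega
            rw [if_neg hdm] at hm1 hm2
            have hmds : '-' ∉ ds := List.count_eq_zero.mp (by omega)
            exact ⟨(cheak_char d).mp ⟨hd, hdm, hdp⟩,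
              fun x hx => (cheak_char x).mp ⟨hds x hx, fun e => hmds (e ▸ hx), fun e => hpds (e ▸ hx)⟩⟩
          · rintro ⟨hd, hds⟩
            obtain ⟨hdm, hdp⟩ := dig_ne d hd
            have hmds : '-' ∉ ds := fun hmem => (dig_ne _ (hds _ hmem)).1 rfl
            have hpds : '+' ∉ ds := fun hmem => (dig_ne _ (hds _ hmem)).2 rfl
            have hc0 : List.count '-' ds = 0 := List.count_eq_zero.mpr hmds
            rw [if_neg hdm, hc0]
            exact ⟨⟨by omega, by omega, hpds, hdp⟩,
              ((cheak_char d).mpr hd).1, fun x hx => ((cheak_char x).mpr (hds x hx)).1⟩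
      · rw [Bool.eq_iff_iff]
        simp [List.all_eq_true, hm, hp]
        constructor
        · rintro ⟨⟨h1, h2, h3, h4⟩, hc, hrest⟩
          have hmr : '-' ∉ rest := List.count_eq_zero.mp (by omega)
          have hpr : '+' ∉ rest := List.count_eq_zero.mp (by omega)
          exact ⟨hc,
            fun x hx => (cheak_char x).mp ⟨hrest x hx, fun e => hmr (e ▸ hx), fun e => hpr (e ▸ hx)⟩⟩
        · rintro ⟨hc, hrest⟩
          have hmr : '-' ∉ rest := fun hmem => (dig_ne _ (hrest _ hmem)).1 rfl
          have hpr : '+' ∉ rest := fun hmem => (dig_ne _ (hrest _ hmem)).2 rfl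
          have h1 : List.count '-' rest = 0 := List.count_eq_zero.mpr hmr
          have h2 : List.count '+' rest = 0 := List.count_eq_zero.mpr hpr
          exact ⟨⟨by omega, by omega, by omega, by omega⟩, hc,
            fun x hx => ((cheak_char x).mpr (hrest x hx)).1⟩

-- ===== VERDICT (by name: the statement is the Claim_ definition above) =====
theorem cheak_int_spec : Claim_equal_cheak_int := by
  intro text _
  exact main text
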